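-- pv_equiv track=rewrite | github.com/symtyx/CS | H7/matmar_220_H7.py | descendants
-- ===== SOURCE A (Python) =====
-- def descendants(family_tree, name, distance):
--     names = []
--     final = []
--     if name in family_tree:
--         True
--     else:
--         return names
--
--     while type(distance) == int:
--         if distance > 1:
--             for first in family_tree[name]:
--                 names.append(descendants(family_tree, first, distance-1))
--         elif distance == 1 or distance < 1:
--             return family_tree[name]
--         break
--     for first in names:
--         for second in first:
--             final.append(second)
--     return final
-- ===== SOURCE B (Python) =====
-- def descendants(family_tree, name, distance):
--     if name not in family_tree or type(distance) != int:
--         return []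
--     if distance <= 1:
--         return family_tree[name]
--     frontier = [name]
--     for _ in range(distance):
--         frontier = [c for n in frontier if n in family_tree for c in family_tree[n]]
--     return frontier
-- ===== Notes on version B (the rewrite author's own statement) =====
-- stated objective: alternative
-- what changed: Replaced A's recursion on distance (each call mapping itself over the children and flattening the per-child result lists) with an iterative breadth-first loop that expands a frontier list generation by generation, distance times.
import Mathlib
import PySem

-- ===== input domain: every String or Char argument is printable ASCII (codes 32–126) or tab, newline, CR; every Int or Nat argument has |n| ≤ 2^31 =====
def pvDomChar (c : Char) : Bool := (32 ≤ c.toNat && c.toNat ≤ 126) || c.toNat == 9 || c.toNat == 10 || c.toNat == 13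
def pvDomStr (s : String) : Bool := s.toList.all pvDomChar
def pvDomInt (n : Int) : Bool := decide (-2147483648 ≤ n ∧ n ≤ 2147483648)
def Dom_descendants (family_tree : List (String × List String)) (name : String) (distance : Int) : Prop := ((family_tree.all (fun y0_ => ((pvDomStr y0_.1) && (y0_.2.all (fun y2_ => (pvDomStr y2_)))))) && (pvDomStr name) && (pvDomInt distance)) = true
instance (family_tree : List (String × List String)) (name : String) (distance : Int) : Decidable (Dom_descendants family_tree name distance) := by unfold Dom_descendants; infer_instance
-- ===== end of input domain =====

-- B replaces A's recursive flatten with an iterative generation-by-generation BFS loop (alternative decomposition, same cost).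

-- ===== PORT A =====
-- A: recursion on distance; dict lookup = first match on the association list.
def descendants (family_tree : List (String × List String)) (name : String) (distance : Int) : List String :=
  match List.lookup name family_tree with
  | none => []                                   -- 'return names' when name not in family_tree
  | some kids =>
    -- while type(distance) == int: always true for an Int argument
    if _h : 1 < distance then
      -- names.append(descendants(...)) for each child, then the double loop flattens
      let names := kids.map (fun first => descendants family_tree first (distance - 1))
      names.foldl (fun final l => final ++ l) []
    else
      kids                                       -- 'return family_tree[name]' when distance <= 1
termination_by distance.toNat
decreasing_by omega

-- ===== PORT B =====
-- one BFS expansion: children of every frontier node present in the tree, in order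
def pvExpand (family_tree : List (String × List String)) (frontier : List String) : List String :=
  frontier.flatMap (fun n => match List.lookup n family_tree with | some cs => cs | none => [])

def descendants_alt (family_tree : List (String × List String)) (name : String) (distance : Int) : List String :=
  match List.lookup name family_tree with
  | none => []
  | some kids =>
    if distance ≤ 1 then kids
    else (PySem.List.pyRange 0 distance 1).foldl (fun frontier _ => pvExpand family_tree frontier) [name]

-- ===== PRECONDITION & SPEC =====
def Spec_descendants (family_tree : List (String × List String)) (name : String) (distance : Int) (out : List String) : Prop := out = descendants_alt family_tree name distance
instance (family_tree : List (String × List String)) (name : String) (distance : Int) (out : List String) : Decidable (Spec_descendants family_tree name distance out) := by unfold Spec_descendants; infer_instance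

-- ===== CLAIM (what is proved, stated in full; the proofs are below) =====
def Claim_equal_descendants : Prop := ∀ (family_tree : List (String × List String)) (name : String) (distance : Int), Dom_descendants family_tree name distance → Spec_descendants family_tree name distance (descendants family_tree name distance)

-- ===== LEMMAS AND PROOFS =====

lemma pvExpand_append (ft : List (String × List String)) (L1 L2 : List String) :
    pvExpand ft (L1 ++ L2) = pvExpand ft L1 ++ pvExpand ft L2 := by
  simp [pvExpand]

lemma pvExpand_iter_nil (ft : List (String × List String)) (k : Nat) :
    (pvExpand ft)^[k] [] = [] := by
  induction k with
  | zero => rfl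
  | succ m ih => rw [Function.iterate_succ_apply]; simpa [pvExpand] using ih

lemma pvExpand_iter_append (ft : List (String × List String)) (k : Nat) (L1 L2 : List String) :
    (pvExpand ft)^[k] (L1 ++ L2) = (pvExpand ft)^[k] L1 ++ (pvExpand ft)^[k] L2 := by
  induction k generalizing L1 L2 with
  | zero => rfl
  | succ m ih => simp only [Function.iterate_succ_apply, pvExpand_append, ih]

lemma pvExpand_iter_flatten (ft : List (String × List String)) (k : Nat) (cs : List String) :
    ((cs.map (fun c => (pvExpand ft)^[k] [c])).foldl (fun final l => final ++ l) []) =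
      (pvExpand ft)^[k] cs := by
  have h : ∀ (l : List (List String)) (acc : List String),
      l.foldl (fun final x => final ++ x) acc = acc ++ l.flatten := by
    intro l
    induction l with
    | nil => simp
    | cons x xs ih => intro acc; simp [ih]
  rw [h]
  simp only [List.nil_append]
  induction cs with
  | nil => simp [pvExpand_iter_nil]
  | cons c cs ih =>
    have hcc : (c :: cs) = [c] ++ cs := rfl
    rw [hcc, pvExpand_iter_append]
    simp [ih]

lemma foldl_const_iterate {α β : Type} (f : β → β) :
    ∀ (l : List α) (b : β), l.foldl (fun fr _ => f fr) b = f^[l.length] b := by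
  intro l
  induction l with
  | nil => intro b; rfl
  | cons x xs ih => intro b; simp [ih, Function.iterate_succ_apply]

lemma descendants_eq_iter (ft : List (String × List String)) :
    ∀ (k : Nat) (n : String), 1 ≤ k →
      descendants ft n (k : Int) = (pvExpand ft)^[k] [n] := by
  intro k
  induction k with
  | zero => intro n h; omega
  | succ m ih =>
    intro n _
    rw [descendants]
    cases hl : List.lookup n ft with
    | none =>
      rw [Function.iterate_succ_apply]
      have : pvExpand ft [n] = [] := by simp [pvExpand, hl]
      rw [this, pvExpand_iter_nil]
    | some cs =>
      have hx : pvExpand ft [n] = cs := by simp [pvExpand, hl]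
      dsimp only
      by_cases hm : m = 0
      · subst hm
        rw [dif_neg (by norm_num)]
        rw [show (0+1) = 1 from rfl, Function.iterate_one, hx]
      · have h1 : (1:Int) < ((m+1 : Nat) : Int) := by push_cast; omega
        rw [dif_pos h1]
        have hsub : ((m+1 : Nat) : Int) - 1 = (m : Int) := by push_cast; ring
        have hmap : cs.map (fun first => descendants ft first (((m+1 : Nat) : Int) - 1)) =
            cs.map (fun c => (pvExpand ft)^[m] [c]) := by
          apply List.map_congr_left
          intro c _
          rw [hsub, ih c (by omega)]
        rw [hmap, pvExpand_iter_flatten, Function.iterate_succ_apply, hx]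

-- ===== VERDICT (by name: the statement is the Claim_ definition above) =====
theorem descendants_spec : Claim_equal_descendants := by
  intro ft name distance _dom
  unfold Spec_descendants
  by_cases hd : distance ≤ 1
  · -- both take the distance <= 1 branch (or the missing-name branch)
    rw [descendants, descendants_alt]
    cases hl : List.lookup name ft with
    | none => rfl
    | some cs =>
      dsimp only
      rw [dif_neg (by omega), if_pos hd]
  · -- distance ≥ 2: A's recursion equals B's iterated expansion
    have h2 : 2 ≤ distance := by omega
    set k := distance.toNat with hk
    have hdk : distance = (k : Int) := by omega
    have hA : descendants ft name distance = (pvExpand ft)^[k] [name] := by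
      rw [hdk]; exact descendants_eq_iter ft k name (by omega)
    rw [hA, descendants_alt]
    cases hl : List.lookup name ft with
    | none =>
      have : pvExpand ft [name] = [] := by simp [pvExpand, hl]
      have hk1 : ∃ m, k = m + 1 := ⟨k - 1, by omega⟩
      obtain ⟨m, hm⟩ := hk1
      rw [hm, Function.iterate_succ_apply, this, pvExpand_iter_nil]
    | some cs =>
      dsimp only
      rw [if_neg hd, foldl_const_iterate]
      congr 1
      rw [PySem.List.length_pyRange_one]
      omega
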